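-- pv_equiv track=rewrite | github.com/anuragk16/engineering-recipes | knowledge-base/scripts/scaffold_hybrid_kb.py | section_contains
-- ===== SOURCE A (Python) =====
-- def section_contains(lines: list[str], heading: str, needle: str) -> bool:
--     start = None
--     for index, line in enumerate(lines):
--         if line.strip() == heading:
--             start = index
--             break
--     if start is None:
--         return False
--
--     end = len(lines)
--     for index in range(start + 1, len(lines)):
--         if lines[index].startswith("## "):
--             end = index
--             break
--     return needle in "\n".join(lines[start:end])
-- ===== SOURCE B (Python) =====
-- def section_contains(lines: list[str], heading: str, needle: str) -> bool:
--     collecting = False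
--     section = []
--     for line in lines:
--         if collecting:
--             if line.startswith("## "):
--                 break
--             section.append(line)
--         elif line.strip() == heading:
--             collecting = True
--             section.append(line)
--     if not section:
--         return False
--     return needle in "\n".join(section)
-- ===== Notes on version B (the rewrite author's own statement) =====
-- stated objective: alternative
-- what changed: Replaced A's two index-based scans (find heading index, find section end index) plus a slice by a single flag-driven pass that accumulates the section's lines directly.
import Mathlib
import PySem

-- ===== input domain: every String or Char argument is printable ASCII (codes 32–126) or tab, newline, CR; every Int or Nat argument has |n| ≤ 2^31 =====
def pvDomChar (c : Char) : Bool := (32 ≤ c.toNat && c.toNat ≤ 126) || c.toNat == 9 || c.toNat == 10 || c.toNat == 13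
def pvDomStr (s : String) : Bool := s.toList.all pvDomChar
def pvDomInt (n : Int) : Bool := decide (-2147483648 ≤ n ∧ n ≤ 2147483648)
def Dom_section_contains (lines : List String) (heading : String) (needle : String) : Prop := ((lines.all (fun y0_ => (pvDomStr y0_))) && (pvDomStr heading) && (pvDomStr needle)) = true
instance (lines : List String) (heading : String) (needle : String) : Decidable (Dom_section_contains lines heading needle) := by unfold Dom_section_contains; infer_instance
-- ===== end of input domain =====

-- B replaces A's two index-based scans plus a slice by one flag-driven pass that
-- collects the section's lines directly (alternative decomposition, same cost).

-- ===== PORT A =====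
-- first loop of A: 'for index, line in enumerate(lines): if line.strip() == heading: start = index; break'
def sectionFindA (lines : List String) (heading : String) (index : Nat) : Option Nat :=
  match lines with
  | [] => none
  | line :: rest =>
      if PySem.Str.strip line == heading then some index
      else sectionFindA rest heading (index + 1)

-- second loop of A: 'for index in range(start+1, len(lines)): if lines[index].startswith("## "): end = index; break'
-- (the in-range index lines[index] is read with getD, exact because index < length here)
def sectionEndA (lines : List String) (index : Nat) : Nat :=
  if h : index < lines.length then
    if PySem.Str.startswith (lines.getD index "") "## " then index
    else sectionEndA lines (index + 1)
  else lines.length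
termination_by lines.length - index

def section_contains (lines : List String) (heading : String) (needle : String) : Bool :=
  match sectionFindA lines heading 0 with
  | none => false
  | some start =>
      let e := sectionEndA lines (start + 1)
      PySem.Str.isIn needle
        (PySem.Str.join "\n" (PySem.List.slice lines (some (start : Int)) (some (e : Int))))

-- ===== PORT B =====
-- B's single pass: 'collecting' flag, 'section' accumulator
def collectB (lines : List String) (heading : String) (collecting : Bool) (section_ : List String) : List String :=
  match lines with
  | [] => section_
  | line :: rest =>
      if collecting then
        if PySem.Str.startswith line "## " then section_
        else collectB rest heading true (section_ ++ [line])
      else if PySem.Str.strip line == heading then collectB rest heading true (section_ ++ [line])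
      else collectB rest heading false section_

def section_contains_alt (lines : List String) (heading : String) (needle : String) : Bool :=
  let sec := collectB lines heading false []
  if sec.isEmpty then false
  else PySem.Str.isIn needle (PySem.Str.join "\n" sec)

-- ===== PRECONDITION & SPEC =====
def Spec_section_contains (lines : List String) (heading : String) (needle : String) (out : Bool) : Prop := out = section_contains_alt lines heading needle
instance (lines : List String) (heading : String) (needle : String) (out : Bool) : Decidable (Spec_section_contains lines heading needle out) := by unfold Spec_section_contains; infer_instance

-- ===== CLAIM (what is proved, stated in full; the proofs are below) =====
def Claim_equal_section_contains : Prop := ∀ (lines : List String) (heading : String) (needle : String), Dom_section_contains lines heading needle → Spec_section_contains lines heading needle (section_contains lines heading needle)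

-- ===== LEMMAS AND PROOFS =====

-- B's collecting phase appends exactly the lines up to the first '## ' line
theorem collectB_true (heading : String) :
    ∀ (xs : List String) (acc : List String),
      collectB xs heading true acc =
        acc ++ xs.takeWhile (fun l => !PySem.Str.startswith l "## ") := by
  intro xs
  induction xs with
  | nil => intro acc; simp [collectB]
  | cons l rest ih =>
      intro acc
      cases h : PySem.Str.startswith l "## " with
      | true => simp at h; simp [collectB, h]
      | false => simp at h; simp [collectB, h, ih, List.append_assoc]

theorem sectionEndA_cons (x : String) (xs : List String) :
    ∀ (i : Nat), sectionEndA (x :: xs) (i + 1) = sectionEndA xs i + 1 := by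
  intro i
  induction hn : xs.length - i using Nat.strong_induction_on generalizing i with
  | _ n ih =>
    by_cases h : i < xs.length
    · have h' : i + 1 < (x :: xs).length := by simp; omega
      have hget : (x :: xs).getD (i + 1) "" = xs.getD i "" := by
        simp [List.getD]
      conv_lhs => rw [sectionEndA]
      conv_rhs => rw [sectionEndA]
      rw [dif_pos h', dif_pos h, hget]
      cases hs : PySem.Str.startswith (xs.getD i "") "## " with
      | true => simp only [if_true]
      | false =>
          simp only [Bool.false_eq_true, if_false]
          exact ih (xs.length - (i + 1)) (by omega) (i + 1) rfl
    · have h' : ¬ i + 1 < (x :: xs).length := by simp; omega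
      conv_lhs => rw [sectionEndA]
      conv_rhs => rw [sectionEndA]
      rw [dif_neg h', dif_neg h]
      simp

-- A's end-scan from index 0 takes exactly the takeWhile prefix
theorem take_sectionEndA_zero :
    ∀ (xs : List String),
      xs.take (sectionEndA xs 0) =
        xs.takeWhile (fun l => !PySem.Str.startswith l "## ") := by
  intro xs
  induction xs with
  | nil => simp [sectionEndA]
  | cons l rest ih =>
      have h0 : (0 : Nat) < (l :: rest).length := by simp
      conv_lhs => rw [sectionEndA]
      rw [dif_pos h0]
      have hget : (l :: rest).getD 0 "" = l := rfl
      rw [hget]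
      cases hs : PySem.Str.startswith l "## " with
      | true =>
          have hs' := hs; simp at hs'
          simp [hs']
      | false =>
          have hs' := hs; simp at hs'
          simp only [Bool.false_eq_true, if_false]
          rw [sectionEndA_cons l rest 0]
          simp [List.take_succ_cons, hs']
          simpa using ih

-- A's index-shift: searching with a bumped start index shifts the found index
theorem sectionFindA_shift (heading : String) :
    ∀ (xs : List String) (i : Nat),
      sectionFindA xs heading (i + 1) = (sectionFindA xs heading i).map (· + 1) := by
  intro xs
  induction xs with
  | nil => intro i; simp [sectionFindA]
  | cons l rest ih =>
      intro i
      cases h : (PySem.Str.strip l == heading) with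
      | true => simp [sectionFindA, h]
      | false => simp [sectionFindA, h, ih]

theorem main_eq (heading needle : String) :
    ∀ (lines : List String),
      section_contains lines heading needle = section_contains_alt lines heading needle := by
  intro lines
  induction lines with
  | nil => simp [section_contains, section_contains_alt, sectionFindA, collectB]
  | cons l rest ih =>
      cases h : (PySem.Str.strip l == heading) with
      | true =>
        -- heading found at the head: both sides take l plus the takeWhile prefix of rest
        have hA : sectionFindA (l :: rest) heading 0 = some 0 := by simp [sectionFindA, h]
        have hE : sectionEndA (l :: rest) (0 + 1) = sectionEndA rest 0 + 1 :=
          sectionEndA_cons l rest 0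
        have hslice : PySem.List.slice (l :: rest) (some ((0 : Nat) : Int))
            (some ((sectionEndA rest 0 + 1 : Nat) : Int)) =
            l :: rest.takeWhile (fun s => !PySem.Str.startswith s "## ") := by
          rw [PySem.List.slice_natCast]
          simp [List.take_succ_cons, take_sectionEndA_zero]
        rw [section_contains, hA]
        simp only [hE, hslice]
        rw [section_contains_alt]
        simp only [collectB, h, if_true, collectB_true, List.nil_append]
        simp
      | false =>
        -- head is not the heading: both sides reduce to the tail
        have hA : section_contains (l :: rest) heading needle =
            section_contains rest heading needle := by
          rw [section_contains, section_contains]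
          simp only [sectionFindA, h, Bool.false_eq_true, if_false]
          rw [sectionFindA_shift]
          cases hf : sectionFindA rest heading 0 with
          | none => simp
          | some s =>
              simp only [Option.map_some]
              have hE : sectionEndA (l :: rest) (s + 1 + 1) = sectionEndA rest (s + 1) + 1 :=
                sectionEndA_cons l rest (s + 1)
              have hslice : PySem.List.slice (l :: rest) (some ((s + 1 : Nat) : Int))
                  (some ((sectionEndA rest (s + 1) + 1 : Nat) : Int)) =
                  PySem.List.slice rest (some ((s : Nat) : Int))
                    (some ((sectionEndA rest (s + 1) : Nat) : Int)) := by
                rw [PySem.List.slice_natCast, PySem.List.slice_natCast]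
                simp only [List.drop_succ_cons]
                congr 1
                omega
              simp only [hE, hslice]
        have hB : section_contains_alt (l :: rest) heading needle =
            section_contains_alt rest heading needle := by
          rw [section_contains_alt, section_contains_alt]
          simp [collectB, h]
        rw [hA, hB, ih]

-- ===== VERDICT (by name: the statement is the Claim_ definition above) =====
theorem section_contains_spec : Claim_equal_section_contains := by
  intro lines heading needle _
  exact main_eq heading needle lines
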